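-- pv_equiv track=rewrite | github.com/Kirill1961/pythonProject2 | map_reduce_datetime (2) (3) (1).py | most_popular_word_reducer
-- ===== SOURCE A (Python) =====
-- from collections import defaultdict, Counter
--
-- def most_popular_word_reducer(words_and_counts):
--     word_count = defaultdict(int)
--     res_user_word_coun = defaultdict(dict)
--     for user, (word, count) in words_and_counts:
--         word_count[user, word] += count
--         [(res_user_word_coun[users].update({words: counts})) for (users, words), counts in
--          word_count.items()]  # изюменка
--     # yield res_user_word_coun  # возврат генератора если вызываем напрямую most_popular_word_reducer()
--     return res_user_word_coun  # простой возврат результата если используем обобщающую ф-цию mapp_reduce()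
-- ===== SOURCE B (Python) =====
-- from collections import defaultdict
--
-- def most_popular_word_reducer(words_and_counts):
--     res = defaultdict(dict)
--     for user, (word, count) in words_and_counts:
--         res[user][word] = res[user].get(word, 0) + count
--     return res
-- ===== Notes on version B (the rewrite author's own statement) =====
-- stated objective: faster
-- what changed: B drops A's flat (user,word)-keyed intermediate dict and its full replay into the nested dict after every input item; B accumulates counts directly into the nested per-user dict in a single pass.
import Mathlib
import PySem

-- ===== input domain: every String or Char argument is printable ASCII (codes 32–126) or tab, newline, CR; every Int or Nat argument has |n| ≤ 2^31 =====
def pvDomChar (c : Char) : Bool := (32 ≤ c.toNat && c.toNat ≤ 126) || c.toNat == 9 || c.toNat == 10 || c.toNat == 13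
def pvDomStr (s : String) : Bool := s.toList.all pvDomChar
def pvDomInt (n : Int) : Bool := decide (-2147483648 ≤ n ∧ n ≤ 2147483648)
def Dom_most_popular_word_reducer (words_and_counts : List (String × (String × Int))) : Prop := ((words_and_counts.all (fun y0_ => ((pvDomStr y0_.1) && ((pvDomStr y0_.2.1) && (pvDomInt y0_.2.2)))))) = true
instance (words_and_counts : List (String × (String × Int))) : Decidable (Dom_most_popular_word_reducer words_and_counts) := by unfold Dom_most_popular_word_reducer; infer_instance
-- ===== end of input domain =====

-- B replaces A's flat (user,word)-keyed dict and its per-item full replay into the nested dict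
-- by direct one-pass accumulation into the nested dict (objective: faster).


-- ===== PORT A =====
-- the list comprehension body: res_user_word_coun[users].update({words: counts})
def pvReplayStep (r : PySem.Dict String (PySem.Dict String Int))
    (p : (String × String) × Int) : PySem.Dict String (PySem.Dict String Int) :=
  r.insert p.1.1 ((r.getD p.1.1 PySem.Dict.empty).insert p.1.2 p.2)

def most_popular_word_reducer (words_and_counts : List (String × (String × Int))) : List (String × List (String × Int)) :=
  let st := words_and_counts.foldl
    (fun (st : PySem.Dict (String × String) Int × PySem.Dict String (PySem.Dict String Int)) q =>
      let wc := st.1.modify (q.1, q.2.1) 0 (· + q.2.2)   -- word_count[user, word] += count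
      (wc, wc.items.foldl pvReplayStep st.2))            -- the comprehension over word_count.items()
    (PySem.Dict.empty, PySem.Dict.empty)
  st.2.items.map (fun p => (p.1, p.2.items))

-- ===== PORT B =====
def pvAccStep (r : PySem.Dict String (PySem.Dict String Int))
    (q : String × (String × Int)) : PySem.Dict String (PySem.Dict String Int) :=
  let inner := r.getD q.1 PySem.Dict.empty
  r.insert q.1 (inner.insert q.2.1 (inner.getD q.2.1 0 + q.2.2))

def most_popular_word_reducer_alt (words_and_counts : List (String × (String × Int))) : List (String × List (String × Int)) :=
  ((words_and_counts.foldl pvAccStep PySem.Dict.empty).items).map (fun p => (p.1, p.2.items))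

-- ===== PRECONDITION & SPEC =====
def Spec_most_popular_word_reducer (words_and_counts : List (String × (String × Int))) (out : List (String × List (String × Int))) : Prop := out = most_popular_word_reducer_alt words_and_counts
instance (words_and_counts : List (String × (String × Int))) (out : List (String × List (String × Int))) : Decidable (Spec_most_popular_word_reducer words_and_counts out) := by unfold Spec_most_popular_word_reducer; infer_instance

-- ===== CLAIM (what is proved, stated in full; the proofs are below) =====
def Claim_equal_most_popular_word_reducer : Prop := ∀ (words_and_counts : List (String × (String × Int))), Dom_most_popular_word_reducer words_and_counts → Spec_most_popular_word_reducer words_and_counts (most_popular_word_reducer words_and_counts)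

-- ===== LEMMAS AND PROOFS =====

-- nested lookup: r[u][w] as an Option
def pvLook2 (r : PySem.Dict String (PySem.Dict String Int)) (u w : String) : Option Int :=
  (r.get? u).bind (fun i => i.get? w)

-- the invariant tying A's flat dict to the nested dict both programs carry
def pvInv (wc : PySem.Dict (String × String) Int)
    (r : PySem.Dict String (PySem.Dict String Int)) : Prop :=
  wc.keys.Nodup ∧ r.keys.Nodup ∧
  (∀ u i, r.get? u = some i → i.keys.Nodup) ∧
  (∀ u w, pvLook2 r u w = wc.get? (u, w))

-- inserting the value already present is the identity
theorem pv_insert_self {κ ν : Type} [BEq κ] [LawfulBEq κ] (d : PySem.Dict κ ν) (k : κ) (v : ν)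
    (hnd : d.keys.Nodup) (h : d.get? k = some v) : d.insert k v = d := by
  apply PySem.Dict.ext
  rw [PySem.Dict.items_insert_of_contains _ v
    (by rw [PySem.Dict.contains_eq_isSome_get?, h]; rfl)]
  conv_rhs => rw [← List.map_id d.items]
  apply List.map_congr_left
  intro p hp
  by_cases hk : p.1 == k
  · simp only [hk, if_true, id]
    have hke : p.1 = k := eq_of_beq hk
    have hv2 : d.get? p.1 = some p.2 := PySem.Dict.get?_of_mem_items d hp hnd
    rw [hke, h] at hv2
    exact Prod.ext hke.symm (Option.some.inj hv2)
  · simp [hk]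

-- replaying an entry already present in the nested dict changes nothing
theorem pv_replay_id (r : PySem.Dict String (PySem.Dict String Int))
    (p : (String × String) × Int) (hr : r.keys.Nodup)
    (hin : ∀ u i, r.get? u = some i → i.keys.Nodup)
    (hp : pvLook2 r p.1.1 p.1.2 = some p.2) : pvReplayStep r p = r := by
  unfold pvLook2 at hp
  cases hgu : r.get? p.1.1 with
  | none => rw [hgu] at hp; simp at hp
  | some i =>
    rw [hgu] at hp; simp only [Option.bind_some] at hp
    unfold pvReplayStep
    rw [PySem.Dict.getD_of_get?_eq_some r PySem.Dict.empty hgu, pv_insert_self i _ _ (hin _ _ hgu) hp,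
      pv_insert_self r _ _ hr hgu]

theorem pv_replay_list_id (l : List ((String × String) × Int))
    (r : PySem.Dict String (PySem.Dict String Int)) (hr : r.keys.Nodup)
    (hin : ∀ u i, r.get? u = some i → i.keys.Nodup)
    (hl : ∀ p ∈ l, pvLook2 r p.1.1 p.1.2 = some p.2) :
    l.foldl pvReplayStep r = r := by
  induction l with
  | nil => rfl
  | cons p t ih =>
    simp only [List.foldl_cons]
    rw [pv_replay_id r p hr hin (hl p (by simp))]
    exact ih (fun q hq => hl q (by simp [hq]))

-- nested lookup after the accumulation step
theorem pv_look2_insert (r : PySem.Dict String (PySem.Dict String Int)) (u w : String) (v : Int)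
    (u' w' : String) :
    pvLook2 (r.insert u ((r.getD u PySem.Dict.empty).insert w v)) u' w' =
      if u' = u ∧ w' = w then some v else pvLook2 r u' w' := by
  unfold pvLook2
  by_cases hu : u' = u
  · subst hu
    rw [PySem.Dict.get?_insert_self]
    by_cases hw : w' = w
    · subst hw; simp [PySem.Dict.get?_insert_self]
    · rw [if_neg (by tauto)]
      simp only [Option.bind_some]
      rw [PySem.Dict.get?_insert_of_ne _ _ hw]
      cases hgu : r.get? u' with
      | none =>
        rw [PySem.Dict.getD_of_get?_eq_none r PySem.Dict.empty hgu]
        simp [PySem.Dict.get?_empty]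
      | some i => rw [PySem.Dict.getD_of_get?_eq_some r PySem.Dict.empty hgu]; simp
  · rw [if_neg (by tauto), PySem.Dict.get?_insert_of_ne _ _ hu]

-- one step of A's fold equals one step of B's fold and preserves the invariant
theorem pv_step (wc : PySem.Dict (String × String) Int)
    (r : PySem.Dict String (PySem.Dict String Int)) (q : String × (String × Int))
    (h : pvInv wc r) :
    (wc.insert (q.1, q.2.1) (wc.getD (q.1, q.2.1) 0 + q.2.2)).items.foldl pvReplayStep r
      = pvAccStep r q ∧
    pvInv (wc.insert (q.1, q.2.1) (wc.getD (q.1, q.2.1) 0 + q.2.2)) (pvAccStep r q) := by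
  obtain ⟨hw, hr, hin, hl⟩ := h
  obtain ⟨u, w, c⟩ := q
  set k : String × String := (u, w) with hk
  set v : Int := wc.getD k 0 + c with hv
  set i' : PySem.Dict String Int := r.getD u PySem.Dict.empty with hi'
  have hinner : ∀ w', i'.get? w' = pvLook2 r u w' := by
    intro w'
    unfold pvLook2
    cases hgu : r.get? u with
    | none => rw [hi', PySem.Dict.getD_of_get?_eq_none r PySem.Dict.empty hgu]; simp [PySem.Dict.get?_empty]
    | some i => rw [hi', PySem.Dict.getD_of_get?_eq_some r PySem.Dict.empty hgu]; simp
  have hbv : pvAccStep r (u, (w, c)) = r.insert u (i'.insert w v) := by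
    unfold pvAccStep
    simp only [← hi']
    rw [hv, PySem.Dict.getD_eq_get?_getD, hinner, hl, ← PySem.Dict.getD_eq_get?_getD]
  have hinodup : i'.keys.Nodup := by
    cases hgu : r.get? u with
    | none => rw [hi', PySem.Dict.getD_of_get?_eq_none r PySem.Dict.empty hgu]; exact PySem.Dict.nodup_keys_empty
    | some i => rw [hi', PySem.Dict.getD_of_get?_eq_some r PySem.Dict.empty hgu]; exact hin _ _ hgu
  -- invariant for the new nested dict
  have hr' : (r.insert u (i'.insert w v)).keys.Nodup := PySem.Dict.nodup_keys_insert _ _ _ hr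
  have hin' : ∀ u'' i, (r.insert u (i'.insert w v)).get? u'' = some i → i.keys.Nodup := by
    intro u'' i hg
    rw [PySem.Dict.get?_insert] at hg
    by_cases hu : u'' = u
    · rw [if_pos hu] at hg
      cases hg
      exact PySem.Dict.nodup_keys_insert _ _ _ hinodup
    · rw [if_neg hu] at hg; exact hin _ _ hg
  have hl' : ∀ u'' w'', pvLook2 (r.insert u (i'.insert w v)) u'' w''
      = (wc.insert k v).get? (u'', w'') := by
    intro u'' w''
    rw [hi', pv_look2_insert, PySem.Dict.get?_insert]
    by_cases hc : u'' = u ∧ w'' = w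
    · rw [if_pos hc, if_pos (by rw [hk]; exact Prod.ext hc.1 hc.2)]
    · rw [if_neg hc, if_neg (by rw [hk]; intro he; exact hc ⟨congrArg Prod.fst he, congrArg Prod.snd he⟩), hl]
  have hmem : ∀ p ∈ wc.items, pvLook2 r p.1.1 p.1.2 = some p.2 := by
    intro p hp
    rw [hl]
    exact (show wc.get? (p.1.1, p.1.2) = some p.2 from by
      rw [show (p.1.1, p.1.2) = p.1 from rfl]; exact PySem.Dict.get?_of_mem_items wc hp hw)
  have hfold : (wc.insert k v).items.foldl pvReplayStep r = r.insert u (i'.insert w v) := by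
    by_cases hck : wc.contains k
    · -- existing key: the items list keeps its shape, one value replaced in place
      obtain ⟨v0, hg0⟩ : ∃ v0, wc.get? k = some v0 := by
        rw [PySem.Dict.contains_eq_isSome_get?] at hck
        cases h : wc.get? k with
        | none => rw [h] at hck; simp at hck
        | some x => exact ⟨x, rfl⟩
      obtain ⟨l1, l2, hsplit⟩ := List.append_of_mem
        (PySem.Dict.mem_items_of_get?_eq_some wc hg0)
      have hkey : ∀ p ∈ l1 ++ l2, p.1 ≠ k := by
        intro p hp hpk
        have hnd := hw
        unfold PySem.Dict.keys at hnd
        rw [hsplit] at hnd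
        simp only [List.map_append, List.map_cons] at hnd
        rcases List.mem_append.mp hp with h1 | h2
        · have hk1 : k ∈ List.map (fun x => x.1) l1 := by
            rw [← hpk]; exact List.mem_map_of_mem h1
          exact List.disjoint_of_nodup_append hnd hk1 (by simp)
        · have hk2 : k ∈ List.map (fun x => x.1) l2 := by
            rw [← hpk]; exact List.mem_map_of_mem h2
          exact (List.nodup_cons.mp (List.nodup_append.mp hnd).2.1).1 hk2
      have hmap : ∀ (l' : List ((String × String) × Int)), (∀ p ∈ l', p.1 ≠ k) →
          l'.map (fun p => if (p.1 == k) = true then (k, v) else p) = l' := by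
        intro l' hne
        conv_rhs => rw [← List.map_id l']
        exact List.map_congr_left (fun p hp => by simp [hne p hp])
      have hitems : (wc.insert k v).items = l1 ++ ((k, v) :: l2) := by
        rw [PySem.Dict.items_insert_of_contains _ v hck, hsplit]
        simp only [List.map_append, List.map_cons, BEq.rfl, if_true]
        congr 1
        · exact hmap l1 (fun p hp => hkey p (List.mem_append_left _ hp))
        · congr 1
          exact hmap l2 (fun p hp => hkey p (List.mem_append_right _ hp))
      rw [hitems, List.foldl_append, List.foldl_cons]
      have h1 : l1.foldl pvReplayStep r = r :=
        pv_replay_list_id _ _ hr hin (fun p hp => hmem p (by rw [hsplit]; simp [hp]))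
      rw [h1]
      have h2 : pvReplayStep r ((k, v)) = r.insert u (i'.insert w v) := by
        unfold pvReplayStep; rw [hk, hi']
      rw [h2]
      apply pv_replay_list_id _ _ hr' hin'
      intro p hp
      rw [hi', pv_look2_insert]
      rw [if_neg (by
        intro hc
        exact hkey p (List.mem_append_right _ hp) (by rw [hk]; exact Prod.ext hc.1 hc.2))]
      exact hmem p (by rw [hsplit]; simp [hp])
    · -- new key: appended at the end
      rw [PySem.Dict.items_insert_of_not_contains _ v (by simpa using hck),
        List.foldl_append,
        pv_replay_list_id _ _ hr hin hmem]
      simp only [List.foldl_cons, List.foldl_nil]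
      unfold pvReplayStep; rw [hk, hi']
  exact ⟨by rw [hfold, hbv], by rw [hbv]; exact ⟨PySem.Dict.nodup_keys_insert _ _ _ hw, hr', hin', hl'⟩⟩

-- the two folds agree from any invariant-linked pair of states
theorem pv_fold_eq (l : List (String × (String × Int)))
    (wc : PySem.Dict (String × String) Int)
    (r : PySem.Dict String (PySem.Dict String Int)) (h : pvInv wc r) :
    (l.foldl
      (fun (st : PySem.Dict (String × String) Int × PySem.Dict String (PySem.Dict String Int)) q =>
        let wc := st.1.modify (q.1, q.2.1) 0 (· + q.2.2)
        (wc, wc.items.foldl pvReplayStep st.2)) (wc, r)).2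
      = l.foldl pvAccStep r := by
  induction l generalizing wc r with
  | nil => rfl
  | cons q t ih =>
    obtain ⟨hfold, hinv⟩ := pv_step wc r q h
    simp only [List.foldl_cons]
    have hmod : wc.modify (q.1, q.2.1) 0 (· + q.2.2)
        = wc.insert (q.1, q.2.1) (wc.getD (q.1, q.2.1) 0 + q.2.2) := rfl
    rw [hmod, hfold]
    exact ih _ _ hinv

-- ===== VERDICT (by name: the statement is the Claim_ definition above) =====
theorem most_popular_word_reducer_spec : Claim_equal_most_popular_word_reducer := by
  intro l _
  have hinv0 : pvInv PySem.Dict.empty PySem.Dict.empty := by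
    refine ⟨PySem.Dict.nodup_keys_empty, PySem.Dict.nodup_keys_empty, ?_, ?_⟩
    · intro u i h
      rw [PySem.Dict.get?_empty] at h
      cases h
    · intro u w
      unfold pvLook2
      rw [PySem.Dict.get?_empty, PySem.Dict.get?_empty]
      rfl
  unfold Spec_most_popular_word_reducer most_popular_word_reducer most_popular_word_reducer_alt
  exact congrArg (fun d => d.items.map (fun p => (p.1, p.2.items))) (pv_fold_eq l _ _ hinv0)
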